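-- pv_equiv track=rewrite | github.com/anantyash1/Ai-Task-Bot | backend/app/services/ai_suggest_service.py | _suggest_priority
-- ===== SOURCE A (Python) =====
-- def _suggest_priority(title: str) -> str:
--     title_lower = title.lower()
--     if any(w in title_lower for w in ["urgent","asap","deadline","critical","emergency"]):
--         return "Critical"
--     if any(w in title_lower for w in ["important","must","today","due"]):
--         return "High"
--     if any(w in title_lower for w in ["whenever","someday","optional","maybe"]):
--         return "Low"
--     return "Medium"
-- ===== SOURCE B (Python) =====
-- _KEYWORD_RANK = {
--     "urgent": 0, "asap": 0, "deadline": 0, "critical": 0, "emergency": 0,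
--     "important": 1, "must": 1, "today": 1, "due": 1,
--     "whenever": 2, "someday": 2, "optional": 2, "maybe": 2,
-- }
-- _RANK_LABEL = ["Critical", "High", "Low", "Medium"]
--
-- def _suggest_priority(title: str) -> str:
--     t = title.lower()
--     best = 3
--     for w, r in _KEYWORD_RANK.items():
--         if r < best and w in t:
--             best = r
--     return _RANK_LABEL[best]
-- ===== Notes on version B (the rewrite author's own statement) =====
-- stated objective: alternative
-- what changed: Replaces three ordered short-circuiting any() scans over separate keyword lists by a single table-driven pass over one keyword->rank map tracking the minimum rank, mapped back to a label at the end.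
import Mathlib
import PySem

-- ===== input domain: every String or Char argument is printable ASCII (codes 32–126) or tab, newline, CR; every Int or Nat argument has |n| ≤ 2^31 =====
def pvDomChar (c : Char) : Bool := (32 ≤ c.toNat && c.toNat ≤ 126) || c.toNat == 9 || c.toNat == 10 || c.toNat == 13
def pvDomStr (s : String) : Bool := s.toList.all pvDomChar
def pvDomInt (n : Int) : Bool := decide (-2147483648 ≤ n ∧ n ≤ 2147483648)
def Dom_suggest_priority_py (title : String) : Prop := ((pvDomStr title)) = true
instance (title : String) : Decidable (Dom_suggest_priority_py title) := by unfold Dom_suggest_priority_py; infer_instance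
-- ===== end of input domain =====

-- B replaces A's three ordered any() scans by one table-driven minimum-rank pass (objective: alternative decomposition).

-- ===== PORT A =====
def suggest_priority_py (title : String) : String :=
  let title_lower := PySem.Str.lower title
  if ["urgent", "asap", "deadline", "critical", "emergency"].any
      (fun w => PySem.Str.isIn w title_lower) then "Critical"
  else if ["important", "must", "today", "due"].any
      (fun w => PySem.Str.isIn w title_lower) then "High"
  else if ["whenever", "someday", "optional", "maybe"].any
      (fun w => PySem.Str.isIn w title_lower) then "Low"
  else "Medium"

-- ===== PORT B =====
def pvKeywordRank : List (String × Nat) :=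
  [("urgent", 0), ("asap", 0), ("deadline", 0), ("critical", 0), ("emergency", 0),
   ("important", 1), ("must", 1), ("today", 1), ("due", 1),
   ("whenever", 2), ("someday", 2), ("optional", 2), ("maybe", 2)]

def pvRankLabel : List String := ["Critical", "High", "Low", "Medium"]

def suggest_priority_py_alt (title : String) : String :=
  let t := PySem.Str.lower title
  let best := pvKeywordRank.foldl
    (fun best wr => if wr.2 < best && PySem.Str.isIn wr.1 t then wr.2 else best) 3
  pvRankLabel.getD best ""

-- ===== PRECONDITION & SPEC =====
def Spec_suggest_priority_py (title : String) (out : String) : Prop := out = suggest_priority_py_alt title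
instance (title : String) (out : String) : Decidable (Spec_suggest_priority_py title out) := by unfold Spec_suggest_priority_py; infer_instance

-- ===== CLAIM (what is proved, stated in full; the proofs are below) =====
def Claim_equal_suggest_priority_py : Prop := ∀ (title : String), Dom_suggest_priority_py title → Spec_suggest_priority_py title (suggest_priority_py title)

-- ===== LEMMAS AND PROOFS =====

-- B's fold over a group of keywords all carrying the same rank r computes:
-- r if r improves on `best` and some keyword matches, otherwise `best` unchanged.
theorem pv_fold_group (t : String) (ws : List String) (r best : Nat) :
    (ws.map (fun w => (w, r))).foldl
        (fun best wr => if wr.2 < best && PySem.Str.isIn wr.1 t then wr.2 else best) best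
      = if r < best && ws.any (fun w => PySem.Str.isIn w t) then r else best := by
  induction ws generalizing best with
  | nil => simp
  | cons w ws ih =>
      simp only [List.map_cons, List.foldl_cons, List.any_cons]
      rw [ih]
      have hrr : decide (r < r) = false := by simp
      by_cases hx : PySem.Str.isIn w t = true
      · by_cases hr : r < best
        · have hd : decide (r < best) = true := by simp [hr]
          simp only [hx, hd, Bool.and_true, Bool.true_or, if_true, hrr,
            Bool.false_and, Bool.false_eq_true, if_false]
        · have hd : decide (r < best) = false := by simp [hr]
          simp only [hx, hd, Bool.false_and, Bool.and_true, Bool.true_or,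
            Bool.false_eq_true, if_false]
      · simp only [Bool.not_eq_true] at hx
        simp only [hx, Bool.and_false, Bool.false_or, Bool.false_eq_true,
          if_false]

theorem pvKeywordRank_split :
    pvKeywordRank =
      (["urgent", "asap", "deadline", "critical", "emergency"].map (fun w => (w, 0)))
        ++ (["important", "must", "today", "due"].map (fun w => (w, 1)))
        ++ (["whenever", "someday", "optional", "maybe"].map (fun w => (w, 2))) := by
  rfl

-- ===== VERDICT (by name: the statement is the Claim_ definition above) =====
theorem suggest_priority_py_spec : Claim_equal_suggest_priority_py := by
  intro title _
  unfold Spec_suggest_priority_py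
  simp only [suggest_priority_py, suggest_priority_py_alt]
  rw [pvKeywordRank_split]
  simp only [List.foldl_append, pv_fold_group]
  generalize (["urgent", "asap", "deadline", "critical", "emergency"].any
      (fun w => PySem.Str.isIn w (PySem.Str.lower title))) = c
  generalize (["important", "must", "today", "due"].any
      (fun w => PySem.Str.isIn w (PySem.Str.lower title))) = h
  generalize (["whenever", "someday", "optional", "maybe"].any
      (fun w => PySem.Str.isIn w (PySem.Str.lower title))) = l
  cases c <;> cases h <;> cases l <;> rfl
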